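-- pv_equiv track=rewrite | github.com/fuguigui/AdventOfCode | Day8/day8.py | calculate_antinodes_per_direction
-- ===== SOURCE A (Python) =====
-- def calculate_antinodes_per_direction(pair, height, width, antinodes):
--     start_node = pair[0]
--     next_node = pair[1]
--     diff_i = next_node[0] - start_node[0]
--     diff_j = next_node[1] - start_node[1]
--     third_i = next_node[0] + diff_i
--     third_j = next_node[1] + diff_j
--     if third_i < 0 or third_i >= height or third_j < 0 or third_j >= width:
--         return antinodes
--     third_node = (third_i, third_j)
--     antinodes.add(third_node)
--     return calculate_antinodes_per_direction([next_node, third_node], height, width, antinodes)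
-- ===== SOURCE B (Python) =====
-- def calculate_antinodes_per_direction(pair, height, width, antinodes):
--     # Iterative version: the step vector is constant, so walk from pair[1]
--     # in steps of (diff_i, diff_j), adding each in-grid point to antinodes.
--     diff_i = pair[1][0] - pair[0][0]
--     diff_j = pair[1][1] - pair[0][1]
--     cur_i, cur_j = pair[1][0], pair[1][1]
--     while True:
--         cur_i += diff_i
--         cur_j += diff_j
--         if cur_i < 0 or cur_i >= height or cur_j < 0 or cur_j >= width:
--             return antinodes
--         antinodes.add((cur_i, cur_j))
-- ===== Notes on version B (the rewrite author's own statement) =====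
-- stated objective: idiomatic
-- what changed: Replaces A's recursion (which rebuilds a two-element list and recomputes the diff at every call) with a single while-loop that computes the constant step vector once and advances the current point.
-- outside the precondition, e.g. on calculate_antinodes_per_direction([(0, 0)], 5, 5, set()): A raises IndexError, B raises IndexError
import Mathlib
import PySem

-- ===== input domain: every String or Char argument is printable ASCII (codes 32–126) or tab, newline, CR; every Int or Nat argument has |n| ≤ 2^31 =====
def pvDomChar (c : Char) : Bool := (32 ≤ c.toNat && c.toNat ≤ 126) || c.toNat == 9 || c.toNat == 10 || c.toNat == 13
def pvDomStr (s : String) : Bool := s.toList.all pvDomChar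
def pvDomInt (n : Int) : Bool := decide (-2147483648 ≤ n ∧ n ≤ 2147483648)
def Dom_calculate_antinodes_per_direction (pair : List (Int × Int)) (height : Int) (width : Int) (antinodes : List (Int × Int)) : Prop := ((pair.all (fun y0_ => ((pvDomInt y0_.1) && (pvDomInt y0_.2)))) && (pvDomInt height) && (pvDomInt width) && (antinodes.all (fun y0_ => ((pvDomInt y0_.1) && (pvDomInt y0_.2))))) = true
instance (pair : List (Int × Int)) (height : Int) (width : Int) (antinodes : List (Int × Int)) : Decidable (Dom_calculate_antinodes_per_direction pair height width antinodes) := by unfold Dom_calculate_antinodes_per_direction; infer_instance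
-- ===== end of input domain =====

-- ===== PORT A =====
-- B (iterative) changes only the decomposition of the same walk; equivalence is about the
-- return value — both Pythons mutate `antinodes` in place identically (same .add calls).
-- Both ports recurse on a fuel counter (height.toNat + width.toNat + 2), a totality guard
-- that is never exhausted on inputs satisfying Pre_.

-- A's recursion: re-reads pair[0]/pair[1] and recomputes the diff at every call.
def pvGoA (fuel : Nat) (pair : List (Int × Int)) (height width : Int)
    (antinodes : List (Int × Int)) : List (Int × Int) :=
  match fuel with
  | 0 => antinodes
  | fuel + 1 =>
    match pair with
    | start_node :: next_node :: _ =>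
      let diff_i := next_node.1 - start_node.1
      let diff_j := next_node.2 - start_node.2
      let third_i := next_node.1 + diff_i
      let third_j := next_node.2 + diff_j
      if third_i < 0 ∨ third_i ≥ height ∨ third_j < 0 ∨ third_j ≥ width then
        antinodes
      else
        pvGoA fuel [next_node, (third_i, third_j)] height width
          (PySem.Set.add antinodes (third_i, third_j))
    | _ => antinodes  -- pair[0]/pair[1] would raise IndexError; excluded by Pre_

def calculate_antinodes_per_direction (pair : List (Int × Int)) (height : Int) (width : Int) (antinodes : List (Int × Int)) : List (Int × Int) :=
  pvGoA (height.toNat + width.toNat + 2) pair height width antinodes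

-- ===== PORT B =====
-- B's loop: constant step (diff_i, diff_j) computed once, current point advanced in place.
def pvLoopB (fuel : Nat) (diff_i diff_j cur_i cur_j height width : Int)
    (antinodes : List (Int × Int)) : List (Int × Int) :=
  match fuel with
  | 0 => antinodes
  | fuel + 1 =>
    let ni := cur_i + diff_i
    let nj := cur_j + diff_j
    if ni < 0 ∨ ni ≥ height ∨ nj < 0 ∨ nj ≥ width then
      antinodes
    else
      pvLoopB fuel diff_i diff_j ni nj height width (PySem.Set.add antinodes (ni, nj))

def calculate_antinodes_per_direction_alt (pair : List (Int × Int)) (height : Int) (width : Int) (antinodes : List (Int × Int)) : List (Int × Int) :=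
  match pair with
  | a :: b :: _ =>
    pvLoopB (height.toNat + width.toNat + 2) (b.1 - a.1) (b.2 - a.2) b.1 b.2
      height width antinodes
  | _ => antinodes  -- pair[1][0] would raise IndexError; excluded by Pre_

-- ===== PRECONDITION & SPEC =====
-- pvAxisLe pos d bound K: walking from pos in constant steps of d, the number of successive
-- positions inside [0, bound) is finite and at most K (closed-form: one floor division).
def pvAxisLe (pos d bound : Int) (K : Int) : Prop :=
  (0 < d ∧ (pos + d < 0 ∨ Int.fdiv (bound - 1 - pos) d ≤ K)) ∨
  (d < 0 ∧ (bound ≤ pos + d ∨ Int.fdiv pos (-d) ≤ K)) ∨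
  (d = 0 ∧ ¬(0 ≤ pos ∧ pos < bound))

-- Pre_ excludes exactly where the Python A does not return a value: lists with fewer than
-- two nodes (pair[1] raises IndexError) and chains of more than 950 in-grid steps, on which
-- A's per-step recursion overruns CPython's default 1000-frame limit and raises
-- RecursionError (the measured crossover is ~998 steps; 950 leaves a small margin because
-- the exact limit depends on the caller's stack depth, so a narrow band of returning inputs
-- near the limit is excluded too — see the cited example).
def Pre_calculate_antinodes_per_direction (pair : List (Int × Int)) (height : Int) (width : Int) (antinodes : List (Int × Int)) : Prop :=
  2 ≤ pair.length ∧
  (let a := pair.getD 0 (0, 0); let b := pair.getD 1 (0, 0);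
    pvAxisLe b.1 (b.1 - a.1) height 950 ∨ pvAxisLe b.2 (b.2 - a.2) width 950)

instance (pair : List (Int × Int)) (height : Int) (width : Int) (antinodes : List (Int × Int)) : Decidable (Pre_calculate_antinodes_per_direction pair height width antinodes) := by unfold Pre_calculate_antinodes_per_direction; unfold pvAxisLe; infer_instance

def pvWitness_calculate_antinodes_per_direction : (List (Int × Int)) × Int × Int × (List (Int × Int)) := ([(0, 0), (1, 1)], 5, 5, [])

def Spec_calculate_antinodes_per_direction (pair : List (Int × Int)) (height : Int) (width : Int) (antinodes : List (Int × Int)) (out : List (Int × Int)) : Prop := out = calculate_antinodes_per_direction_alt pair height width antinodes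
instance (pair : List (Int × Int)) (height : Int) (width : Int) (antinodes : List (Int × Int)) (out : List (Int × Int)) : Decidable (Spec_calculate_antinodes_per_direction pair height width antinodes out) := by unfold Spec_calculate_antinodes_per_direction; infer_instance

-- ===== CLAIM (what is proved, stated in full; the proofs are below) =====
def Claim_equal_calculate_antinodes_per_direction : Prop := ∀ (pair : List (Int × Int)) (height : Int) (width : Int) (antinodes : List (Int × Int)), Dom_calculate_antinodes_per_direction pair height width antinodes → Pre_calculate_antinodes_per_direction pair height width antinodes → Spec_calculate_antinodes_per_direction pair height width antinodes (calculate_antinodes_per_direction pair height width antinodes)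

-- ===== LEMMAS AND PROOFS =====
-- Core invariant: A's recursion on the rebuilt two-element list equals B's loop on the
-- constant step vector, for ANY fuel (so the claim needs no fuel-sufficiency argument).
theorem pvGoA_eq_loopB (fuel : Nat) :
    ∀ (a b : Int × Int) (rest : List (Int × Int)) (height width : Int)
      (antinodes : List (Int × Int)),
      pvGoA fuel (a :: b :: rest) height width antinodes =
        pvLoopB fuel (b.1 - a.1) (b.2 - a.2) b.1 b.2 height width antinodes := by
  induction fuel with
  | zero => intro a b rest height width antinodes; rfl
  | succ f ih =>
    intro a b rest height width antinodes
    simp only [pvGoA, pvLoopB]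
    split_ifs with h
    · rfl
    · rw [ih]
      norm_num

-- ===== VERDICT (by name: the statement is the Claim_ definition above) =====
theorem calculate_antinodes_per_direction_spec : Claim_equal_calculate_antinodes_per_direction := by
  intro pair height width antinodes _ hpre
  unfold Spec_calculate_antinodes_per_direction
  match pair with
  | [] => simp [Pre_calculate_antinodes_per_direction] at hpre
  | [_] => simp [Pre_calculate_antinodes_per_direction] at hpre
  | a :: b :: rest =>
    unfold calculate_antinodes_per_direction calculate_antinodes_per_direction_alt
    rw [pvGoA_eq_loopB]
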